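-- pv_equiv track=rewrite | github.com/AbdulselamAbdurehman/competitive-programming | absolute.py | absoulte_dev
-- ===== SOURCE A (Python) =====
-- def absoulte_dev(arr):
--     total = sum(arr)
--     n = len(arr)
--     running_total = 0
--     for k in range(1, n+1):
--         result = total - 2 * running_total + (2 * k - n - 2) * arr[k-1]
--         running_total += arr[k-1]
--         arr[k-1] = result
--     return arr
-- ===== SOURCE B (Python) =====
-- def absoulte_dev(arr):
--     orig = list(arr)
--     n = len(orig)
--     for i in range(n):
--         acc = 0
--         for j in range(n):
--             if j < i:
--                 acc += orig[i] - orig[j]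
--             elif j > i:
--                 acc += orig[j] - orig[i]
--         arr[i] = acc
--     return arr
-- ===== Notes on version B (the rewrite author's own statement) =====
-- stated objective: alternative
-- what changed: Replaces A's single running-prefix-sum pass (total - 2*running + (2k-n-2)*a_k) with an explicit nested double scan over a snapshot of the original values, summing signed pairwise differences (orig[i]-orig[j] for j<i, orig[j]-orig[i] for j>i) per index.
import Mathlib
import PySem

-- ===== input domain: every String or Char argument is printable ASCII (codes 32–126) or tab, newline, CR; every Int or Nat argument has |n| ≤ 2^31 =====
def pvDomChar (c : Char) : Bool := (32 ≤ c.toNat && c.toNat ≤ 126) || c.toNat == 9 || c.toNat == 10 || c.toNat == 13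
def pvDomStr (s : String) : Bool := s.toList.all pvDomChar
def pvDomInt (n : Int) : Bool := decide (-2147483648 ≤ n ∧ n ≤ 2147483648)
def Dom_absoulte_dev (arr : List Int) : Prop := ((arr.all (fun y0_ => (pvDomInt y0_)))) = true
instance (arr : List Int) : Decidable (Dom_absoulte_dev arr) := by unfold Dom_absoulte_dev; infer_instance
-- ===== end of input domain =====

-- B replaces A's single running-prefix-sum pass by a nested double scan of signed pairwise
-- differences against a snapshot of the originals (alternative decomposition, not faster).
-- A mutates its argument list in place (B performs the same mutation in Python); the
-- equivalence proved here is about the RETURN value.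

-- ===== PORT A =====
-- the loop 'for k in range(1, n+1)': state (running_total, arr)
def pvALoop (total n : Int) : List Int → Int → List Int → List Int
  | [], _, arr => arr
  | k :: ks, rt, arr =>
    let a := PySem.List.pyGetD arr (k - 1) 0   -- index k-1 with 0 ≤ k-1 < n: always in range
    pvALoop total n ks (rt + a)
      (PySem.List.pySetD arr (k - 1) (total - 2 * rt + (2 * k - n - 2) * a))

def absoulte_dev (arr : List Int) : List Int :=
  pvALoop arr.sum (arr.length : Int) (PySem.List.pyRange 1 ((arr.length : Int) + 1) 1) 0 arr

-- ===== PORT B =====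
-- the inner loop 'for j in range(n)' accumulating signed differences against the snapshot
def pvBInner (orig : List Int) (i : Int) : List Int → Int → Int
  | [], acc => acc
  | j :: js, acc =>
    pvBInner orig i js (acc +
      (if j < i then PySem.List.pyGetD orig i 0 - PySem.List.pyGetD orig j 0
       else if i < j then PySem.List.pyGetD orig j 0 - PySem.List.pyGetD orig i 0
       else 0))

-- the outer loop 'for i in range(n): arr[i] = acc' builds the result positionally
def absoulte_dev_alt (arr : List Int) : List Int :=
  (PySem.List.pyRange 0 (arr.length : Int) 1).map
    (fun i => pvBInner arr i (PySem.List.pyRange 0 (arr.length : Int) 1) 0)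

-- ===== PRECONDITION & SPEC =====
def Spec_absoulte_dev (arr : List Int) (out : List Int) : Prop := out = absoulte_dev_alt arr
instance (arr : List Int) (out : List Int) : Decidable (Spec_absoulte_dev arr out) := by unfold Spec_absoulte_dev; infer_instance

-- ===== CLAIM (what is proved, stated in full; the proofs are below) =====
def Claim_equal_absoulte_dev : Prop := ∀ (arr : List Int), Dom_absoulte_dev arr → Spec_absoulte_dev arr (absoulte_dev arr)

-- ===== LEMMAS AND PROOFS =====

def pvResList (total n : Int) : List Int → Int → Int → List Int
  | [], _, _ => []
  | a :: rest, rt, m => (total - 2 * rt + (2 * (m + 1) - n - 2) * a) :: pvResList total n rest (rt + a) (m + 1)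
theorem pvGetD_append_length (l : List Int) (a : Int) (r : List Int) :
    (l ++ a :: r).getD l.length 0 = a := by
  simp [List.getD]
theorem pvSet_append_length (l : List Int) (a : Int) (r : List Int) (v : Int) :
    (l ++ a :: r).set l.length v = (l ++ [v]) ++ r := by
  rw [List.set_append_right _ _ (le_refl _)]
  simp
theorem pvALoop_eq (total n : Int) : ∀ (rest done : List Int) (rt : Int),
    pvALoop total n (PySem.List.pyRange ((done.length : Int) + 1) ((done.length : Int) + rest.length + 1) 1) rt (done ++ rest)
      = done ++ pvResList total n rest rt (done.length : Int) := by
  intro rest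
  induction rest with
  | nil =>
    intro done rt
    rw [PySem.List.pyRange_one_eq_nil (by simp)]
    simp [pvALoop, pvResList]
  | cons a rest ih =>
    intro done rt
    rw [PySem.List.pyRange_one_cons (by simp)]
    show pvALoop total n _ _ _ = _
    rw [pvALoop]
    have hidx : (done.length : Int) + 1 - 1 = ((done.length : Int)) := by ring
    rw [hidx]
    have hget : PySem.List.pyGetD (done ++ a :: rest) ((done.length : Int)) 0 = a := by
      rw [PySem.List.pyGetD_natCast]; exact pvGetD_append_length done a rest
    have hset : PySem.List.pySetD (done ++ a :: rest) ((done.length : Int))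
        (total - 2 * rt + (2 * ((done.length : Int) + 1) - n - 2) * a)
        = (done ++ [total - 2 * rt + (2 * ((done.length : Int) + 1) - n - 2) * a]) ++ rest := by
      rw [PySem.List.pySetD_natCast]; exact pvSet_append_length done a rest _
    simp only [hget, hset]
    rw [pvResList]
    have h2 := ih (done ++ [total - 2 * rt + (2 * ((done.length : Int) + 1) - n - 2) * a]) (rt + a)
    simp only [List.length_append, List.length_cons, List.length_nil, Nat.cast_add,
      Nat.cast_one, Nat.cast_zero, List.append_assoc, List.singleton_append] at h2 ⊢
    ring_nf at h2 ⊢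
    exact h2
theorem pvResList_eq (total n : Int) : ∀ (rest : List Int) (rt m : Int),
    pvResList total n rest rt m = (List.range rest.length).map
      (fun p => total - 2 * (rt + ((rest.take p).sum)) + (2 * (m + p) - n) * rest.getD p 0) := by
  intro rest
  induction rest with
  | nil => intro rt m; simp [pvResList]
  | cons a rest ih =>
    intro rt m
    rw [pvResList, List.length_cons, List.range_succ_eq_map, List.map_cons, List.map_map]
    congr 1
    · simp only [List.take_zero, List.sum_nil, List.getD_cons_zero, Nat.cast_zero]; ring
    · rw [ih]
      apply List.map_congr_left
      intro p _
      simp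
      ring
theorem pvBInner_append (orig : List Int) (i : Int) : ∀ (js ks : List Int) (acc : Int),
    pvBInner orig i (js ++ ks) acc = pvBInner orig i ks (pvBInner orig i js acc) := by
  intro js
  induction js with
  | nil => intro ks acc; rfl
  | cons j js ih => intro ks acc; rw [List.cons_append, pvBInner, pvBInner]; exact ih ks _

theorem pvBInner_lt (orig : List Int) (i : Int) : ∀ (k : Nat), (k : Int) ≤ i → k ≤ orig.length →
    ∀ acc, pvBInner orig i (PySem.List.pyRange 0 (k : Int) 1) acc
      = acc + k * PySem.List.pyGetD orig i 0 - (orig.take k).sum := by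
  intro k
  induction k with
  | zero =>
    intro _ _ acc
    rw [show ((0:Nat):Int) = 0 from rfl, PySem.List.pyRange_one_eq_nil le_rfl]
    simp [pvBInner]
  | succ k ih =>
    intro hki hkl acc
    have hk : (k:Int) ≤ i := by push_cast at hki; omega
    have hkl' : k ≤ orig.length := by omega
    have hklt : k < orig.length := by omega
    rw [show ((k+1:Nat):Int) = (k:Int)+1 by push_cast; ring]
    rw [PySem.List.pyRange_one_succ_right (by positivity)]
    rw [pvBInner_append, ih hk hkl' acc, pvBInner, pvBInner]
    rw [if_pos (show (k:Int) < i by omega)]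
    rw [List.sum_take_succ orig k hklt]
    rw [PySem.List.pyGetD_natCast, List.getD_eq_getElem orig 0 hklt]
    ring

theorem pvBInner_gt (orig : List Int) (i : Int) (a : Nat) (hia : i < (a : Int)) :
    ∀ (b : Nat), a ≤ b → b ≤ orig.length →
    ∀ acc, pvBInner orig i (PySem.List.pyRange (a : Int) (b : Int) 1) acc
      = acc + ((orig.take b).sum - (orig.take a).sum) - ((b : Int) - a) * PySem.List.pyGetD orig i 0 := by
  intro b
  induction b with
  | zero =>
    intro hab _ acc
    have ha : a = 0 := Nat.le_zero.mp hab
    subst ha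
    rw [show ((0:Nat):Int) = 0 from rfl, PySem.List.pyRange_one_eq_nil le_rfl]
    simp [pvBInner]
  | succ b ih =>
    intro hab hbl acc
    rcases Nat.lt_or_ge b a with h | h
    · have ha : a = b + 1 := by omega
      subst ha
      rw [PySem.List.pyRange_one_eq_nil le_rfl]
      simp [pvBInner]
    · have hbl' : b ≤ orig.length := by omega
      have hblt : b < orig.length := by omega
      rw [show ((b+1:Nat):Int) = (b:Int)+1 by push_cast; ring]
      rw [PySem.List.pyRange_one_succ_right (by exact_mod_cast h)]
      rw [pvBInner_append, ih h hbl' acc, pvBInner, pvBInner]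
      have hib : i < (b:Int) := lt_of_lt_of_le hia (by exact_mod_cast h)
      rw [if_neg (show ¬ ((b:Int) < i) by omega), if_pos hib]
      rw [List.sum_take_succ orig b hblt]
      rw [PySem.List.pyGetD_natCast orig b 0, List.getD_eq_getElem orig 0 hblt]
      ring

theorem pvBInner_full (orig : List Int) (k : Nat) (hk : k < orig.length) :
    pvBInner orig (k : Int) (PySem.List.pyRange 0 (orig.length : Int) 1) 0
      = orig.sum - 2 * (orig.take k).sum + (2 * (k : Int) - orig.length) * orig.getD k 0 := by
  rw [PySem.List.pyRange_one_append 0 (k : Int) (orig.length : Int) (by positivity) (by exact_mod_cast hk.le)]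
  rw [pvBInner_append, pvBInner_lt orig (k : Int) k le_rfl hk.le 0]
  rw [PySem.List.pyRange_one_cons (by exact_mod_cast hk)]
  rw [pvBInner]
  rw [if_neg (lt_irrefl _), if_neg (lt_irrefl _)]
  rw [show ((k:Int)+1) = ((k+1:Nat):Int) by push_cast; ring]
  rw [pvBInner_gt orig (k : Int) (k+1) (by push_cast; omega) orig.length (by omega) le_rfl]
  rw [List.sum_take_succ orig k hk, List.take_length]
  rw [PySem.List.pyGetD_natCast orig k 0, List.getD_eq_getElem orig 0 hk]
  push_cast
  ring
theorem pvMapB (arr js : List Int) :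
    (PySem.List.pyRange 0 (arr.length : Int) 1).map (fun i => pvBInner arr i js 0)
      = (List.range arr.length).map (fun (p : Nat) => pvBInner arr (p : Int) js 0) := by
  rw [PySem.List.pyRange_one, List.map_map]
  simp only [sub_zero, Int.toNat_natCast]
  apply List.map_congr_left
  intro k _
  simp

theorem absoulte_dev_main (arr : List Int) : absoulte_dev arr = absoulte_dev_alt arr := by
  have hA : absoulte_dev arr = pvResList arr.sum (arr.length : Int) arr 0 0 := by
    have h := pvALoop_eq arr.sum (arr.length : Int) arr [] 0
    simpa [absoulte_dev] using h
  have hB : absoulte_dev_alt arr = (List.range arr.length).map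
      (fun p => arr.sum - 2 * (arr.take p).sum + (2 * (p : Int) - arr.length) * arr.getD p 0) := by
    unfold absoulte_dev_alt
    rw [pvMapB]
    apply List.map_congr_left
    intro p hp
    exact pvBInner_full arr p (List.mem_range.mp hp)
  rw [hA, hB, pvResList_eq]
  apply List.map_congr_left
  intro p hp
  ring_nf

-- ===== VERDICT (by name: the statement is the Claim_ definition above) =====
theorem absoulte_dev_spec : Claim_equal_absoulte_dev := by
  intro arr _
  exact absoulte_dev_main arr
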